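-- pv_equiv track=rewrite | github.com/Catamarca406/University | Uni/PrimoAnno/Programmazione/Ex_tutor/coeff_jaccard.py | intersezione
-- ===== SOURCE A (Python) =====
-- def intersezione(a,b):
--     d1={}
--     l1=len(a)
--     d2={}
--     l2=len(b)
--
--     for i in range(l1):
--         if a[i] not in d1:
--             d1[a[i]]= 1
--         else:
--             d1[a[i]] +=1
--
--
--     for i in range(l2):
--         if b[i] not in d2:
--             d2[b[i]]= 1
--         else:
--             d2[b[i]] +=1
--
--
--     intersec=0
--
--     for num in a:
--         if num in d1 and num in d2:
--             intersec+=1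
--     return intersec
-- ===== SOURCE B (Python) =====
-- def intersezione(a, b):
--     sa = sorted(a)
--     sb = sorted(set(b))
--     i = j = 0
--     total = 0
--     while i < len(sa) and j < len(sb):
--         if sa[i] < sb[j]:
--             i += 1
--         elif sb[j] < sa[i]:
--             j += 1
--         else:
--             total += 1
--             i += 1
--     return total
-- ===== Notes on version B (the rewrite author's own statement) =====
-- stated objective: alternative
-- what changed: Replaces A's hash-dict counting (two dict-building loops plus a per-element membership pass) by sorting: sort a, sort the distinct values of b, and count matches with a single two-pointer merge scan over the two sorted lists, using no hash structure at all.
import Mathlib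
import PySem

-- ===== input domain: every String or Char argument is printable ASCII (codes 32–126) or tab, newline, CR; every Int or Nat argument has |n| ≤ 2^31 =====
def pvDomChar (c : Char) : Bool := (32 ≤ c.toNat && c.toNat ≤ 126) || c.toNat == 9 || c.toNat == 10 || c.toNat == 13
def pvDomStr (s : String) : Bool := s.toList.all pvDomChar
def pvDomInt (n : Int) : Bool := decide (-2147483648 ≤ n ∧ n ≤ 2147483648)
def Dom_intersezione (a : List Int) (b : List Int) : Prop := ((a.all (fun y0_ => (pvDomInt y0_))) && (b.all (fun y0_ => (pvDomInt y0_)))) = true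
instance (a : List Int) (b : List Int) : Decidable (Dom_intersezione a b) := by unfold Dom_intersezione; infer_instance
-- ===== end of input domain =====

-- B replaces A's hash-dict counting by sorting a and the distinct values of b and
-- counting matches with a two-pointer merge scan (objective: alternative algorithm).

-- ===== PORT A =====
-- the body of A's two (identical) counting-loop iterations: "if x not in d: d[x]=1 else: d[x]+=1"
def countStep (d : PySem.Dict Int Int) (x : Int) : PySem.Dict Int Int :=
  if ¬ d.contains x then d.insert x 1 else d.modify x 0 (· + 1)

-- literal port: index loops over range(len(·)); pyGetD's default 0 is never used (index always in range)
def intersezione (a : List Int) (b : List Int) : Int :=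
  let l1 := PySem.List.len a
  let l2 := PySem.List.len b
  let d1 : PySem.Dict Int Int :=
    (PySem.List.pyRange 0 l1 1).foldl (fun d i => countStep d (PySem.List.pyGetD a i 0)) PySem.Dict.empty
  let d2 : PySem.Dict Int Int :=
    (PySem.List.pyRange 0 l2 1).foldl (fun d i => countStep d (PySem.List.pyGetD b i 0)) PySem.Dict.empty
  a.foldl (fun intersec num =>
      if d1.contains num && d2.contains num then intersec + 1 else intersec) 0

-- ===== PORT B =====
-- Source B's while loop with indices i, j over the two sorted lists, transcribed as
-- recursion on the unscanned suffixes (advancing an index = dropping the head)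
def mergeCount : List Int → List Int → Int
  | [], _ => 0
  | _ :: _, [] => 0
  | x :: xs, y :: ys =>
    if x < y then mergeCount xs (y :: ys)
    else if y < x then mergeCount (x :: xs) ys
    else mergeCount xs (y :: ys) + 1
termination_by xs ys => xs.length + ys.length

def intersezione_alt (a : List Int) (b : List Int) : Int :=
  let sa := PySem.List.sorted a (fun x => x) false
  let sb := PySem.List.sorted (PySem.Set.ofList b) (fun x => x) false
  mergeCount sa sb

-- ===== PRECONDITION & SPEC =====
def Spec_intersezione (a : List Int) (b : List Int) (out : Int) : Prop := out = intersezione_alt a b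
instance (a : List Int) (b : List Int) (out : Int) : Decidable (Spec_intersezione a b out) := by unfold Spec_intersezione; infer_instance

-- ===== CLAIM =====
def Claim_equal_intersezione : Prop := ∀ (a : List Int) (b : List Int), Dom_intersezione a b → Spec_intersezione a b (intersezione a b)

-- ===== LEMMAS AND PROOFS =====

-- A's counting loop over a list l: membership in the built dict is list membership
theorem contains_countLoop (l : List Int) (d : PySem.Dict Int Int) (k : Int) :
    ((l.foldl countStep d).contains k) = (decide (k ∈ l) || d.contains k) := by
  induction l generalizing d with
  | nil => simp
  | cons x t ih =>
    simp only [List.foldl_cons, ih, List.mem_cons, countStep]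
    by_cases hc : d.contains x = true
    · rw [if_neg (by simp [hc]), PySem.Dict.contains_modify]
      by_cases hk : k = x
      · simp [hk, hc]
      · simp [beq_eq_false_iff_ne.mpr hk, hk]
    · rw [if_pos (by simp [hc]), PySem.Dict.contains_insert]
      by_cases hk : k = x
      · simp [hk]
      · simp [beq_eq_false_iff_ne.mpr hk, hk]

-- A's result counts the elements of a that occur in b
theorem intersezione_eq_countP (a b : List Int) :
    intersezione a b = ((a.countP (fun x => decide (x ∈ b))) : Int) := by
  simp only [intersezione]
  rw [PySem.List.foldl_pyRange_zero_pyGetD a 0 countStep PySem.Dict.empty,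
      PySem.List.foldl_pyRange_zero_pyGetD b 0 countStep PySem.Dict.empty]
  rw [PySem.List.foldl_congr_mem a _
      (fun intersec num => if decide (num ∈ b) then intersec + 1 else intersec) 0
      (by
        intro acc x hx
        simp [contains_countLoop, hx])]
  rw [PySem.List.foldl_count_if]
  simp

-- the merge scan over a ≤-sorted xs and a <-sorted ys counts the xs-elements lying in ys
theorem mergeCount_eq (xs ys : List Int) (hxs : xs.Pairwise (· ≤ ·))
    (hys : ys.Pairwise (· < ·)) :
    mergeCount xs ys = ((xs.countP (fun x => decide (x ∈ ys))) : Int) := by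
  induction xs, ys using mergeCount.induct with
  | case1 ys => simp [mergeCount]
  | case2 x xs => simp [mergeCount]
  | case3 x xs y ys hlt ih =>
    -- x < y: x is below every element of y::ys, hence not in it
    have hx_not : x ∉ y :: ys := by
      intro hmem
      rcases List.mem_cons.mp hmem with h | h
      · omega
      · have := (List.pairwise_cons.mp hys).1 x h; omega
    rw [mergeCount, if_pos hlt, ih (List.pairwise_cons.mp hxs).2 hys]
    simp only [List.mem_cons, not_or] at hx_not
    simp [List.countP_cons]
    exact hx_not
  | case4 x xs y ys hnlt hlt ih =>
    -- y < x: y is below every element of x::xs, so membership in y::ys reduces to ys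
    have hk : ∀ z ∈ x :: xs, ((z ∈ y :: ys) ↔ (z ∈ ys)) := by
      intro z hz
      have hxz : x ≤ z := by
        rcases List.mem_cons.mp hz with h | h
        · omega
        · exact (List.pairwise_cons.mp hxs).1 z h
      simp only [List.mem_cons]
      constructor
      · rintro (h | h)
        · omega
        · exact h
      · exact Or.inr
    rw [mergeCount, if_neg hnlt, if_pos hlt,
        ih hxs (List.pairwise_cons.mp hys).2,
        List.countP_congr (p := fun z => decide (z ∈ y :: ys)) (q := fun z => decide (z ∈ ys))
          (fun z hz => by simp only [decide_eq_true_eq]; exact hk z hz)]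
  | case5 x xs y ys hnlt hnlt2 ih =>
    -- x = y: x ∈ y::ys, count it and advance in xs
    have hxy : x = y := by omega
    rw [mergeCount, if_neg hnlt, if_neg hnlt2, ih (List.pairwise_cons.mp hxs).2 hys]
    simp [hxy]

-- B's result is the same count
theorem intersezione_alt_eq_countP (a b : List Int) :
    intersezione_alt a b = ((a.countP (fun x => decide (x ∈ b))) : Int) := by
  simp only [intersezione_alt]
  rw [mergeCount_eq _ _
      (by simpa using PySem.List.sorted_pairwise a (fun x => x))
      (PySem.List.sorted_ofList_pairwise_lt b)]
  have hmem : ∀ z : Int,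
      ((z ∈ PySem.List.sorted (PySem.Set.ofList b) (fun x => x) false) ↔ (z ∈ b)) := by
    intro z
    simp [PySem.List.mem_sorted, PySem.Set.mem_ofList]
  rw [List.countP_congr
      (p := fun z => decide (z ∈ PySem.List.sorted (PySem.Set.ofList b) (fun x => x) false))
      (q := fun z => decide (z ∈ b))
      (fun z _ => by simp only [decide_eq_true_eq]; exact hmem z)]
  rw [(PySem.List.sorted_perm a (fun x => x) false).countP_eq]

-- ===== VERDICT =====
theorem intersezione_spec : Claim_equal_intersezione := by
  intro a b _
  unfold Spec_intersezione
  rw [intersezione_eq_countP, intersezione_alt_eq_countP]
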